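-- pv_equiv track=rewrite | github.com/ydb-platform/ydb | contrib/python/supervenn/supervenn/_algorithms.py | break_into_chunks
-- ===== SOURCE A (Python) =====
-- from collections import defaultdict
--
-- def break_into_chunks(sets):
--     """
--     Let us have a collection {S_1, ..., S_n} of finite sets and U be the union of all these sets.
--     For a given subset C = {i_1, ..., i_k} of indices {1, ..., n}, define the 'chunk', corresponding to C, as the set
--     of elements of U, that belong to S_i_1, ..., S_i_k, but not to any of the other sets.
--     For example, for a collection of two sets {S_1, S_2}, there can be max three chunks: S_1 - S_2, S_2 - S_1, S1 & S_2.
--     For three sets, there can be max 7 chunks (imagine a generic three-way Venn diagram and count how many different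
--     area colors it can have).
--     In general, the number of possible non-empty chunks for a collection of n sets is equal to min(|U|, 2^n - 1).
--     Any chunk either lies completely inside any or completely outside any of the sets S_1, ... S_n.
--
--     This function takes a list of sets as its only argument and returns a dict with frozensets of indices as keys and
--     chunks as values.
--     :param sets: list of sets
--     :return: chunks_dict - dict with frozensets as keys and sets as values.
--     """
--     if not sets:
--         raise ValueError('Sets list is empty.')
--
--     all_items = set.union(*sets)
--
--     if not all_items:
--         raise ValueError('All sets are empty')
--
--     # Each chunk is characterized by its occurrence pattern, which is a unique subset of indices of our sets.
--     # E.g. chunk with signature {1, 2, 5} is exactly the set of items such that they belong to sets 1, 2, 5, and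
--     # don't belong to any of the other sets.
--     # Build a dict with signatures as keys (as frozensets), and lists of items as values,
--     chunks_dict = defaultdict(set)
--     for item in all_items:
--         occurrence_pattern = frozenset({i for i, set_ in enumerate(sets) if item in set_})
--         chunks_dict[occurrence_pattern].add(item)
--     return dict(chunks_dict)
-- ===== SOURCE B (Python) =====
-- def break_into_chunks(sets):
--     if not sets:
--         raise ValueError('Sets list is empty.')
--
--     # One pass over the sets: item -> list of indices of the sets containing it.
--     occurrences = {}
--     for i, set_ in enumerate(sets):
--         for item in set_:
--             occurrences.setdefault(item, []).append(i)
--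
--     if not occurrences:
--         raise ValueError('All sets are empty')
--
--     # Group items by their occurrence pattern.
--     chunks_dict = {}
--     for item, indices in occurrences.items():
--         chunks_dict.setdefault(frozenset(indices), set()).add(item)
--     return chunks_dict
-- ===== Notes on version B (the rewrite author's own statement) =====
-- stated objective: faster
-- what changed: Instead of testing every union element against every set (O(|U|*n)), B iterates each set once, accumulating an item->indices map, then groups items by their index pattern in one pass (O(sum of set sizes)).
import Mathlib
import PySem

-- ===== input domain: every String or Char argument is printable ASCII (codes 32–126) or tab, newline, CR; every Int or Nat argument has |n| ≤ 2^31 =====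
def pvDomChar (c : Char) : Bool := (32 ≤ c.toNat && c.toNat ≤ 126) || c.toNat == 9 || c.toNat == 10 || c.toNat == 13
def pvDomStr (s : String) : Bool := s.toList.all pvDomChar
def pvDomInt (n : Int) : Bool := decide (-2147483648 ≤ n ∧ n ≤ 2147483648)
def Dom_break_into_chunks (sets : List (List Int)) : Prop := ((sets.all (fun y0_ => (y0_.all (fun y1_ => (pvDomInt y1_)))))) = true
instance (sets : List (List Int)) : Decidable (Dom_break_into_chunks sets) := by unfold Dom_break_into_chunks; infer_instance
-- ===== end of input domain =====

-- B replaces A's per-union-element scan of all sets by a single pass over the sets that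
-- accumulates an item -> indices map, then groups items by pattern (asymptotically faster).
-- Python set/frozenset/dict outputs are compared as sets / order-insensitively, so both ports
-- use first-occurrence iteration order where CPython's set iteration order is arbitrary.

-- ===== PORT A =====
def break_into_chunks (sets : List (List Int)) : List (List Int × List Int) :=
  -- all_items = set.union(*sets)  (first-occurrence order for CPython's arbitrary set order)
  let all_items : PySem.Set Int := PySem.Set.ofList sets.flatten
  -- for item in all_items: chunks_dict[frozenset({i for i, set_ in enumerate(sets) if item in set_})].add(item)
  let chunks : PySem.Dict (List Int) (List Int) :=
    all_items.foldl (fun d item =>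
      let pat : List Int := PySem.Set.ofList
        (((PySem.List.enumerate sets 0).filter (fun p => PySem.Set.contains p.2 item)).map (fun p => p.1))
      d.modify pat [] (fun c => PySem.Set.add c item)) PySem.Dict.empty
  chunks.items

-- ===== PORT B =====
def break_into_chunks_alt (sets : List (List Int)) : List (List Int × List Int) :=
  -- for i, set_ in enumerate(sets): for item in set_: occurrences.setdefault(item, []).append(i)
  let occ : PySem.Dict Int (List Int) :=
    (PySem.List.enumerate sets 0).foldl
      (fun d p => p.2.foldl (fun d item => d.modify item [] (fun l => l ++ [p.1])) d)
      PySem.Dict.empty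
  -- for item, indices in occurrences.items(): chunks_dict.setdefault(frozenset(indices), set()).add(item)
  let chunks : PySem.Dict (List Int) (List Int) :=
    occ.items.foldl (fun c q =>
      let key : List Int := PySem.Set.ofList q.2
      c.modify key [] (fun s => PySem.Set.add s q.1)) PySem.Dict.empty
  chunks.items

-- ===== PRECONDITION & SPEC =====
-- A raises ValueError when the sets list is empty or when all sets are empty; exactly those inputs are excluded.
def Pre_break_into_chunks (sets : List (List Int)) : Prop :=
  sets ≠ [] ∧ sets.flatten ≠ []
instance (sets : List (List Int)) : Decidable (Pre_break_into_chunks sets) := by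
  unfold Pre_break_into_chunks; infer_instance
def pvWitness_break_into_chunks : List (List Int) := [[1, 2], [2, 3]]

def Spec_break_into_chunks (sets : List (List Int)) (out : List (List Int × List Int)) : Prop := out = break_into_chunks_alt sets
instance (sets : List (List Int)) (out : List (List Int × List Int)) : Decidable (Spec_break_into_chunks sets out) := by unfold Spec_break_into_chunks; infer_instance

-- ===== CLAIM (what is proved, stated in full; the proofs are below) =====
def Claim_equal_break_into_chunks : Prop := ∀ (sets : List (List Int)), Dom_break_into_chunks sets → Pre_break_into_chunks sets → Spec_break_into_chunks sets (break_into_chunks sets)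

-- ===== LEMMAS AND PROOFS =====

-- equal tails keep ofList equal under a common head
theorem pv_ofList_cons_congr (a : Int) (T T' : List Int) (h : PySem.Set.ofList T = PySem.Set.ofList T') :
    PySem.Set.ofList (a :: T) = PySem.Set.ofList (a :: T') := by
  rw [PySem.Set.ofList_cons, PySem.Set.ofList_cons, h]

-- a run of equal elements collapses to one under ofList
theorem pv_ofList_replicate_append (n : Nat) (i : Int) (T : List Int) :
    PySem.Set.ofList (List.replicate (n + 1) i ++ T) = PySem.Set.ofList (i :: T) := by
  induction n with
  | zero => rfl
  | succ m ih =>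
    rw [show List.replicate (m + 2) i ++ T = i :: (List.replicate (m + 1) i ++ T) from rfl]
    rw [PySem.Set.ofList_cons, ih, PySem.Set.ofList_cons]
    simp [PySem.Set.discard, List.filter_filter]

-- the stream of (item, index) pairs B's first loop processes
def pvPairs (sets : List (List Int)) : List (Int × Int) :=
  (PySem.List.enumerate sets 0).flatMap (fun p => p.2.map (fun y => (y, p.1)))

theorem pv_occ_eq (sets : List (List Int)) :
    (PySem.List.enumerate sets 0).foldl
      (fun d p => p.2.foldl (fun d item => d.modify item [] (fun l => l ++ [p.1])) d)
      (PySem.Dict.empty : PySem.Dict Int (List Int))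
    = (pvPairs sets).foldl (fun d q => d.modify q.1 [] (fun l => l ++ [q.2])) PySem.Dict.empty := by
  simp only [pvPairs, List.foldl_flatMap, List.foldl_map]

theorem pv_map_fst_pairs (sets : List (List Int)) :
    (pvPairs sets).map (fun q => q.1) = sets.flatten := by
  simp only [pvPairs, List.map_flatMap, List.map_map]
  rw [show (fun p : Int × List Int => p.2.map ((fun q : Int × Int => q.1) ∘ fun y => (y, p.1)))
        = (fun p : Int × List Int => p.2.map id) from by funext p; rfl]
  simp only [List.map_id]
  rw [show (PySem.List.enumerate sets 0).flatMap (fun p : Int × List Int => p.2)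
        = ((PySem.List.enumerate sets 0).map (fun p => p.2)).flatten from List.flatMap_def ..]
  rw [PySem.List.map_snd_enumerate]

theorem pv_key_eq (l : List (Int × List Int)) (x : Int) :
    PySem.Set.ofList
      (((l.flatMap (fun p => p.2.map (fun y => (y, p.1)))).filter (fun q => q.1 == x)).map (fun q => q.2))
    = PySem.Set.ofList ((l.filter (fun p => PySem.Set.contains p.2 x)).map (fun p => p.1)) := by
  induction l with
  | nil => rfl
  | cons hd tl ih =>
    obtain ⟨i, s⟩ := hd
    simp only [List.flatMap_cons, List.filter_append, List.map_append, List.filter_cons]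
    rw [List.filter_map]
    have hcomp : ((fun q : Int × Int => q.1 == x) ∘ fun y => (y, i)) = fun y => y == x := by
      funext y; rfl
    rw [hcomp]
    by_cases hx : x ∈ s
    · have hc : PySem.Set.contains s x = true := (PySem.Set.contains_iff s x).2 hx
      rw [if_pos hc]
      have hne : s.filter (fun y => y == x) ≠ [] := by
        intro h
        have : x ∈ s.filter (fun y => y == x) := List.mem_filter.2 ⟨hx, by exact beq_self_eq_true x⟩
        rw [h] at this; exact absurd this (List.not_mem_nil)
      obtain ⟨k, hk⟩ : ∃ k, (s.filter (fun y => y == x)).length = k + 1 := by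
        cases hl : (s.filter (fun y => y == x)).length with
        | zero => exact absurd (List.length_eq_zero_iff.1 hl) hne
        | succ k => exact ⟨k, rfl⟩
      have hrep : ((s.filter (fun y => y == x)).map (fun y => (y, i))).map (fun q => q.2)
          = List.replicate (k + 1) i := by
        rw [List.map_map]
        have : ((fun q : Int × Int => q.2) ∘ fun y => (y, i)) = Function.const Int i := by
          funext y; rfl
        rw [this, List.map_const, hk]
      rw [hrep, pv_ofList_replicate_append, List.map_cons]
      exact pv_ofList_cons_congr i _ _ ih
    · have hc : PySem.Set.contains s x = false := by
        cases h : PySem.Set.contains s x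
        · rfl
        · exact absurd ((PySem.Set.contains_iff s x).1 h) hx
      rw [if_neg (fun h => hx ((PySem.Set.contains_iff s x).1 h))]
      have hnilf : s.filter (fun y => y == x) = [] := by
        rw [List.filter_eq_nil_iff]
        intro a ha hax
        exact hx (by rwa [show a = x from by simpa using hax] at ha)
      rw [hnilf]
      simpa using ih

theorem pv_main (sets : List (List Int)) :
    break_into_chunks sets = break_into_chunks_alt sets := by
  simp only [break_into_chunks, break_into_chunks_alt]
  rw [pv_occ_eq]
  have hkeys : ((pvPairs sets).foldl (fun d q => d.modify q.1 [] (fun l => l ++ [q.2]))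
      (PySem.Dict.empty : PySem.Dict Int (List Int))).keys = PySem.Set.ofList sets.flatten := by
    rw [PySem.Dict.keys_foldl_modify_key (pvPairs sets) (fun q => q.1) []
        (fun _ q => (fun l => l ++ [q.2]))]
    rw [PySem.Dict.keys_empty, PySem.Set.update_nil_left, pv_map_fst_pairs]
  have hgetD : ∀ x, ((pvPairs sets).foldl (fun d q => d.modify q.1 [] (fun l => l ++ [q.2]))
      (PySem.Dict.empty : PySem.Dict Int (List Int))).getD x []
      = ((pvPairs sets).filter (fun q => q.1 == x)).map (fun q => q.2) := by
    intro x
    rw [PySem.Dict.getD_foldl_modify_append (pvPairs sets) PySem.Dict.empty x]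
    rw [PySem.Dict.getD_empty, List.nil_append]
  have hnd : ((pvPairs sets).foldl (fun d q => d.modify q.1 [] (fun l => l ++ [q.2]))
      (PySem.Dict.empty : PySem.Dict Int (List Int))).keys.Nodup := by
    rw [hkeys]; exact PySem.Set.nodup_ofList _
  conv_rhs => rw [PySem.Dict.items_eq_map_keys _ hnd ([] : List Int), hkeys, List.foldl_map]
  have hfun : (fun (c : PySem.Dict (List Int) (List Int)) (item : Int) =>
        c.modify (PySem.Set.ofList
          (((PySem.List.enumerate sets 0).filter (fun p => PySem.Set.contains p.2 item)).map
            (fun p => p.1))) [] (fun c' => PySem.Set.add c' item))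
      = (fun (c : PySem.Dict (List Int) (List Int)) (k : Int) =>
        c.modify (PySem.Set.ofList
          (((pvPairs sets).foldl (fun d q => d.modify q.1 [] (fun l => l ++ [q.2]))
            (PySem.Dict.empty : PySem.Dict Int (List Int))).getD k [])) []
          (fun s => PySem.Set.add s k)) := by
    funext c k
    rw [hgetD k]
    show _ = c.modify (PySem.Set.ofList
        ((((PySem.List.enumerate sets 0).flatMap (fun p => p.2.map (fun y => (y, p.1)))).filter
          (fun q => q.1 == k)).map (fun q => q.2))) [] (fun s => PySem.Set.add s k)
    rw [pv_key_eq]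
  rw [← hfun]

-- ===== VERDICT (by name: the statement is the Claim_ definition above) =====
theorem break_into_chunks_spec : Claim_equal_break_into_chunks := by
  intro sets _ _
  exact pv_main sets
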